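-- pv_equiv track=rewrite | github.com/reisenx/2110101-COM-PROG | G66 Grader 2566/Grader 03 Semester 2/2566_2_Quiz_3_2/2566_2_Quiz_3_2.py | count_friends
-- ===== SOURCE A (Python) =====
-- def tuple_to_dict(data):
--     friends = {}
--     for name01,name02 in data:
--         if(name01 not in friends):
--             friends[name01] = {name02}
--         else:
--             friends[name01].add(name02)
--         if(name02 not in friends):
--             friends[name02] = {name01}
--         else:
--             friends[name02].add(name01)
--     return friends
--
-- def count_friends(data, names):
--     friends = tuple_to_dict(data)
--     count = []
--     for item in names:
--         if(item in friends):
--             count.append((item, len(friends[item])))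
--         else:
--             count.append((item, 0))
--     count.sort()
--     return count
-- ===== SOURCE B (Python) =====
-- def count_friends(data, names):
--     # No adjacency table: each name's distinct friends are found by one direct
--     # scan of the edge list, deduplicating as we go.
--     count = []
--     for name in names:
--         seen = []
--         for a, b in data:
--             if a == name and b not in seen:
--                 seen.append(b)
--             if b == name and a not in seen:
--                 seen.append(a)
--         count.append((name, len(seen)))
--     count.sort()
--     return count
-- ===== Notes on version B (the rewrite author's own statement) =====
-- stated objective: simpler
-- what changed: Drops the adjacency-dictionary-of-sets entirely: for each queried name B re-scans the edge list once, collecting its distinct neighbours in a dedup list, then sorts the (name, count) pairs.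
import Mathlib
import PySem

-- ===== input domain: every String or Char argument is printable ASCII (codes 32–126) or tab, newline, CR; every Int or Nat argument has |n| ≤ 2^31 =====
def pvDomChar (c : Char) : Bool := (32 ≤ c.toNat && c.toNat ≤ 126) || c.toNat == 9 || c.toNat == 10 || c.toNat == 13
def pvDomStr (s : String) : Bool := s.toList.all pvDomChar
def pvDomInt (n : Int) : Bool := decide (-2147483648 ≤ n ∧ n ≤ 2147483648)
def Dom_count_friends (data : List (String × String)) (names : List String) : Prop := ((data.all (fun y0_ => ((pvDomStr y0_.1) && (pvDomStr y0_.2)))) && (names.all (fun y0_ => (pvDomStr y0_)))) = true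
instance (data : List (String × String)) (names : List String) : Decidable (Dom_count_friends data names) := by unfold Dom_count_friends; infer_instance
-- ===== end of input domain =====

-- B drops A's adjacency dictionary-of-sets: each name's distinct friends are found by a
-- direct dedup scan of the edge list (objective: simpler; not claimed faster).

-- ===== PORT A =====
-- loop body of tuple_to_dict's 'for name01,name02 in data' (branches in Python's order)
def tupleToDictStep (friends : PySem.Dict String (PySem.Set String)) (p : String × String) :
    PySem.Dict String (PySem.Set String) :=
  let friends1 :=
    if !friends.contains p.1 then friends.insert p.1 (PySem.Set.ofList [p.2])
    else friends.modify p.1 PySem.Set.empty (fun s => s.add p.2)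
  if !friends1.contains p.2 then friends1.insert p.2 (PySem.Set.ofList [p.1])
  else friends1.modify p.2 PySem.Set.empty (fun s => s.add p.1)

def tuple_to_dict (data : List (String × String)) : PySem.Dict String (PySem.Set String) :=
  data.foldl tupleToDictStep PySem.Dict.empty

def count_friends (data : List (String × String)) (names : List String) : List (String × Int) :=
  let friends := tuple_to_dict data
  let count := names.foldl (fun count item =>
    if friends.contains item then
      -- friends[item]: guarded by the contains check, so getD with a dummy default is exact
      count ++ [(item, PySem.Set.len (friends.getD item PySem.Set.empty))]
    else count ++ [(item, 0)]) []
  PySem.List.sorted2 count (fun q => q.1) (fun q => q.2)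

-- ===== PORT B =====
-- inner loop body of Source B's 'for a, b in data' dedup scan
def altScanStep (name : String) (seen : List String) (p : String × String) : List String :=
  let seen1 := if p.1 == name && !(seen.contains p.2) then seen ++ [p.2] else seen
  if p.2 == name && !(seen1.contains p.1) then seen1 ++ [p.1] else seen1

def count_friends_alt (data : List (String × String)) (names : List String) : List (String × Int) :=
  let count := names.foldl (fun count name =>
    count ++ [(name, ((data.foldl (altScanStep name) []).length : Int))]) []
  PySem.List.sorted2 count (fun q => q.1) (fun q => q.2)

-- ===== PRECONDITION & SPEC =====
def Spec_count_friends (data : List (String × String)) (names : List String) (out : List (String × Int)) : Prop := out = count_friends_alt data names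
instance (data : List (String × String)) (names : List String) (out : List (String × Int)) : Decidable (Spec_count_friends data names out) := by unfold Spec_count_friends; infer_instance

-- ===== CLAIM (what is proved, stated in full; the proofs are below) =====
def Claim_equal_count_friends : Prop := ∀ (data : List (String × String)) (names : List String), Dom_count_friends data names → Spec_count_friends data names (count_friends data names)

-- ===== LEMMAS AND PROOFS =====

-- one dictionary update of A (at key k, adding value v), seen through getD at n
lemma getD_upd (d : PySem.Dict String (PySem.Set String)) (k v n : String) :
    (if !d.contains k then d.insert k (PySem.Set.ofList [v])
     else d.modify k PySem.Set.empty (fun s => s.add v)).getD n PySem.Set.empty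
    = if k = n then PySem.Set.add (d.getD n PySem.Set.empty) v
      else d.getD n PySem.Set.empty := by
  by_cases hc : d.contains k = true
  · simp only [hc, Bool.not_true, Bool.false_eq_true, if_false, PySem.Dict.getD_modify]
    by_cases h : k = n
    · simp [h]
    · have hne : n ≠ k := fun e => h e.symm
      simp [h, hne]
  · have hc' : d.contains k = false := by simpa using hc
    have hk : d.getD k ([] : List String) = [] :=
      PySem.Dict.getD_of_not_contains d [] hc'
    simp only [hc', Bool.not_false, if_true, PySem.Dict.getD_insert]
    by_cases h : k = n
    · subst h
      simp [hk, PySem.Set.empty, PySem.Set.ofList]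
    · have hne : n ≠ k := fun e => h e.symm
      simp [h, hne]

-- one edge of A's dict-building loop equals one edge of B's dedup scan, at any name n
lemma getD_step (d : PySem.Dict String (PySem.Set String)) (p : String × String) (n : String) :
    (tupleToDictStep d p).getD n PySem.Set.empty
      = altScanStep n (d.getD n PySem.Set.empty) p := by
  unfold tupleToDictStep altScanStep
  rw [getD_upd, getD_upd]
  by_cases h1 : p.1 = n <;> by_cases h2 : p.2 = n <;>
    simp [h1, h2, PySem.Set.add_eq_ite]

-- the whole loops agree: A's dict entry for n is exactly B's scan result for n
lemma getD_foldl (data : List (String × String)) (n : String) :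
    ∀ d : PySem.Dict String (PySem.Set String),
      (data.foldl tupleToDictStep d).getD n PySem.Set.empty
        = data.foldl (altScanStep n) (d.getD n PySem.Set.empty) := by
  induction data with
  | nil => intro d; rfl
  | cons p t ih => intro d; simp only [List.foldl_cons]; rw [ih, getD_step]

lemma entry_eq (data : List (String × String)) (n : String) :
    (tuple_to_dict data).getD n PySem.Set.empty = data.foldl (altScanStep n) [] := by
  unfold tuple_to_dict
  rw [getD_foldl]
  rfl

lemma count_friends_main (data : List (String × String)) (names : List String) :
    count_friends data names = count_friends_alt data names := by
  dsimp only [count_friends, count_friends_alt]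
  have hbody : ∀ (acc : List (String × Int)) (item : String),
      (if (tuple_to_dict data).contains item then
        acc ++ [(item, PySem.Set.len ((tuple_to_dict data).getD item PySem.Set.empty))]
       else acc ++ [(item, 0)])
      = acc ++ [(item, ((data.foldl (altScanStep item) []).length : Int))] := by
    intro acc item
    by_cases hc : (tuple_to_dict data).contains item = true
    · rw [if_pos hc, entry_eq]
      simp [PySem.Set.len]
    · have hc' : (tuple_to_dict data).contains item = false := by simpa using hc
      have hg : (tuple_to_dict data).getD item PySem.Set.empty = PySem.Set.empty :=
        PySem.Dict.getD_of_not_contains _ _ hc'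
      rw [if_neg (by simp [hc']), ← entry_eq data item, hg]
      simp [PySem.Set.empty]
  have hfun : (fun (count : List (String × Int)) (item : String) =>
      if (tuple_to_dict data).contains item then
        count ++ [(item, PySem.Set.len ((tuple_to_dict data).getD item PySem.Set.empty))]
      else count ++ [(item, 0)])
      = (fun (count : List (String × Int)) (name : String) =>
          count ++ [(name, ((data.foldl (altScanStep name) []).length : Int))]) := by
    funext acc item; exact hbody acc item
  rw [hfun]

-- ===== VERDICT (by name: the statement is the Claim_ definition above) =====
theorem count_friends_spec : Claim_equal_count_friends :=
  fun data names _ => count_friends_main data names
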